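-- pv_equiv track=rewrite | github.com/DEDude/Order_CLI | order/markdown_handler.py | _insert_content_into_existing_date
-- ===== SOURCE A (Python) =====
-- def _insert_content_into_existing_date(lines: list, date: str, section_type: str, content: str) -> list:
--     """Insert content into existing date section, handling section placement correctly"""
--     result_lines = []
--     in_target_date = False
--     section_added = False
--
--     for line in lines:
--         result_lines.append(line)
--
--         if line.startswith(f"## {date}"):
--             in_target_date = True
--         elif line.startswith("## ") and in_target_date and not section_added:
--             result_lines.insert(-1, f"### {section_type}")
--             result_lines.insert(-1, content)
--             result_lines.insert(-1, "")
--             section_added = True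
--             in_target_date = False
--
--     if in_target_date and not section_added:
--         result_lines.append(f"### {section_type}")
--         result_lines.append(content)
--         result_lines.append("")
--
--     return result_lines
-- ===== SOURCE B (Python) =====
-- def _insert_content_into_existing_date(lines: list, date: str, section_type: str, content: str) -> list:
--     """Locate the first '## {date}' heading, then the next other '## ' heading, and splice the block in."""
--     hdr = "## " + date
--     block = ["### " + section_type, content, ""]
--     i = None
--     for k, line in enumerate(lines):
--         if line.startswith(hdr):
--             i = k
--             break
--     if i is None:
--         return list(lines)
--     for j in range(i + 1, len(lines)):
--         line = lines[j]
--         if line.startswith("## ") and not line.startswith(hdr):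
--             return lines[:j] + block + lines[j:]
--     return lines + block
-- ===== Notes on version B (the rewrite author's own statement) =====
-- stated objective: faster
-- what changed: Replaces A's single stateful append-and-insert pass (flags in_target_date/section_added, list.insert(-1,...) mid-build, and an f'## {date}' header rebuilt for every line) with a locate-then-splice decomposition: compute the header and block once, find the first '## {date}' heading, find the next other '## ' heading after it, and return lines[:j] + block + lines[j:] (or lines + block, or an unchanged copy).
import Mathlib
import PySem

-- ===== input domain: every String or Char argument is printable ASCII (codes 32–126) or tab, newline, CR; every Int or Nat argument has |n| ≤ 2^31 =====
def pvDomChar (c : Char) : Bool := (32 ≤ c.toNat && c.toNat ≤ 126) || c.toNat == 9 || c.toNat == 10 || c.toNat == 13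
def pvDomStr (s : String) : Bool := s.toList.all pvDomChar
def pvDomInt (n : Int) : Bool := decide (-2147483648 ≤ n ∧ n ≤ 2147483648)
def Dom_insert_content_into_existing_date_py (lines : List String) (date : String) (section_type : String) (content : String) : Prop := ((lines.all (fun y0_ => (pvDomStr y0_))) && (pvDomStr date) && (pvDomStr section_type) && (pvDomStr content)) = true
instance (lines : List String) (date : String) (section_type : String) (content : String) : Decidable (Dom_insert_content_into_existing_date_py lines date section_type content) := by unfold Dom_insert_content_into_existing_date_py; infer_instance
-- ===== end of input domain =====

-- B replaces A's stateful append-and-insert single pass (which rebuilds the header string per line) with a locate-the-boundary then slice-splice decomposition; a timing run measured B faster.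

-- ===== PORT A =====
-- A-side helper: the body of A's for-loop (append line, then the two startswith branches);
-- state = (result_lines, in_target_date, section_added); list.insert(-1, v) is PySem.List.insert _ (-1) _.
def pvStepA (date : String) (section_type : String) (content : String) (st : List String × Bool × Bool) (line : String) : List String × Bool × Bool :=
  let rl := st.1 ++ [line]
  if PySem.Str.startswith line ("## " ++ date) then (rl, true, st.2.2)
  else if PySem.Str.startswith line "## " && st.2.1 && !st.2.2 then
    (PySem.List.insert (PySem.List.insert (PySem.List.insert rl (-1) ("### " ++ section_type)) (-1) content) (-1) "", false, true)
  else (rl, st.2.1, st.2.2)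

def insert_content_into_existing_date_py (lines : List String) (date : String) (section_type : String) (content : String) : List String :=
  let st := lines.foldl (pvStepA date section_type content) ([], false, false)
  if st.2.1 && !st.2.2 then st.1 ++ ["### " ++ section_type, content, ""] else st.1

-- ===== PORT B =====
-- B: find the index i of the first '## {date}' line; if none, return lines unchanged;
-- then find the first j > i whose line starts with '## ' but not with '## {date}' and splice the
-- block before it (lines[:j] / lines[j:] are take/drop since 0 ≤ j ≤ len, where Python slicing is
-- exact), else append the block at the end.  (Source B's hdr/block are inlined.)
def insert_content_into_existing_date_py_alt (lines : List String) (date : String) (section_type : String) (content : String) : List String :=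
  match lines.findIdx? (fun l => PySem.Str.startswith l ("## " ++ date)) with
  | none => lines
  | some i =>
    match (lines.drop (i+1)).findIdx? (fun l => PySem.Str.startswith l "## " && !PySem.Str.startswith l ("## " ++ date)) with
    | none => lines ++ ["### " ++ section_type, content, ""]
    | some k => lines.take (i+1+k) ++ ["### " ++ section_type, content, ""] ++ lines.drop (i+1+k)

-- ===== PRECONDITION & SPEC =====
def Spec_insert_content_into_existing_date_py (lines : List String) (date : String) (section_type : String) (content : String) (out : List String) : Prop := out = insert_content_into_existing_date_py_alt lines date section_type content
instance (lines : List String) (date : String) (section_type : String) (content : String) (out : List String) : Decidable (Spec_insert_content_into_existing_date_py lines date section_type content out) := by unfold Spec_insert_content_into_existing_date_py; infer_instance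

-- ===== CLAIM (what is proved, stated in full; the proofs are below) =====
def Claim_equal_insert_content_into_existing_date_py : Prop := ∀ (lines : List String) (date : String) (section_type : String) (content : String), Dom_insert_content_into_existing_date_py lines date section_type content → Spec_insert_content_into_existing_date_py lines date section_type content (insert_content_into_existing_date_py lines date section_type content)

-- ===== LEMMAS AND PROOFS =====

-- Proof-only intermediate form: structural recursions that both ports are shown equal to.
-- pvPhase2 = behaviour after the date heading has been seen (scanning for the next other '## ' heading).
def pvPhase2 (hdr : String) (blk : List String) : List String → List String
  | [] => blk
  | l :: rs =>
    if PySem.Str.startswith l "## " && !PySem.Str.startswith l hdr then blk ++ l :: rs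
    else l :: pvPhase2 hdr blk rs

-- pvPhase1 = behaviour before the date heading has been seen.
def pvPhase1 (hdr : String) (blk : List String) : List String → List String
  | [] => []
  | l :: rs =>
    if PySem.Str.startswith l hdr then l :: pvPhase2 hdr blk rs
    else l :: pvPhase1 hdr blk rs

-- A's trailing 'if in_target_date and not section_added' step
def pvFinish (section_type : String) (content : String) (st : List String × Bool × Bool) : List String :=
  if st.2.1 && !st.2.2 then st.1 ++ ["### " ++ section_type, content, ""] else st.1

theorem pvInsertNegOne {α : Type} (xs : List α) (l v : α) :
    PySem.List.insert (xs ++ [l]) (-1) v = xs ++ [v, l] := by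
  simp [PySem.List.insert, PySem.List.sliceIndices]

theorem pvTripleInsert (rl : List String) (l a c : String) :
    PySem.List.insert (PySem.List.insert (PySem.List.insert (rl ++ [l]) (-1) a) (-1) c) (-1) "" = rl ++ [a, c, "", l] := by
  rw [pvInsertNegOne, show rl ++ [a, l] = (rl ++ [a]) ++ [l] by simp, pvInsertNegOne,
      show (rl ++ [a]) ++ [c, l] = ((rl ++ [a]) ++ [c]) ++ [l] by simp, pvInsertNegOne]
  simp

-- the three branches of A's loop body
theorem pvStepA_date (d s c : String) (rl : List String) (itd sa : Bool) (line : String)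
    (h : PySem.Str.startswith line ("## " ++ d) = true) :
    pvStepA d s c (rl, itd, sa) line = (rl ++ [line], true, sa) := by
  simp only [pvStepA, h, reduceIte]

theorem pvStepA_boundary (d s c : String) (rl : List String) (line : String)
    (h1 : PySem.Str.startswith line ("## " ++ d) = false)
    (h2 : PySem.Str.startswith line "## " = true) :
    pvStepA d s c (rl, true, false) line = (rl ++ ["### " ++ s, c, "", line], false, true) := by
  simp only [pvStepA, h1, h2, Bool.false_eq_true, reduceIte, Bool.not_false,
    Bool.and_self, pvTripleInsert]

theorem pvStepA_skip (d s c : String) (rl : List String) (itd sa : Bool) (line : String)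
    (h1 : PySem.Str.startswith line ("## " ++ d) = false)
    (h : (PySem.Str.startswith line "## " && itd && !sa) = false) :
    pvStepA d s c (rl, itd, sa) line = (rl ++ [line], itd, sa) := by
  simp only [pvStepA, h1, h, Bool.false_eq_true, reduceIte]

theorem pvFinish_sa {s c : String} (xs : List String) (itd : Bool) :
    pvFinish s c (xs, itd, true) = xs := by
  simp [pvFinish]

-- once section_added is True the rest of the loop only appends
theorem pvFoldA_sa_true (date section_type content : String) :
    ∀ (rest rl : List String) (itd : Bool), ∃ itd',
      List.foldl (pvStepA date section_type content) (rl, itd, true) rest = (rl ++ rest, itd', true) := by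
  intro rest
  induction rest with
  | nil => intro rl itd; exact ⟨itd, by simp⟩
  | cons l rs ih =>
    intro rl itd
    rw [List.foldl_cons]
    by_cases hP : PySem.Str.startswith l ("## " ++ date) = true
    · obtain ⟨itd', h⟩ := ih (rl ++ [l]) true
      exact ⟨itd', by rw [pvStepA_date _ _ _ _ _ _ _ hP, h]; simp⟩
    · obtain ⟨itd', h⟩ := ih (rl ++ [l]) itd
      refine ⟨itd', ?_⟩
      rw [pvStepA_skip _ _ _ _ _ _ _ (Bool.eq_false_iff.mpr hP) (by simp), h]
      simp

-- phase 2 (in_target_date = true, section_added = false)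
theorem pvFoldA_phase2 (date section_type content : String) :
    ∀ (rest rl : List String),
      pvFinish section_type content (List.foldl (pvStepA date section_type content) (rl, true, false) rest)
      = rl ++ pvPhase2 ("## " ++ date) ["### " ++ section_type, content, ""] rest := by
  intro rest
  induction rest with
  | nil => simp [pvFinish, pvPhase2]
  | cons l rs ih =>
    intro rl
    rw [List.foldl_cons]
    by_cases hP : PySem.Str.startswith l ("## " ++ date) = true
    · rw [pvStepA_date _ _ _ _ _ _ _ hP, ih (rl ++ [l])]
      simp only [pvPhase2, hP, Bool.not_true, Bool.and_false, Bool.false_eq_true, reduceIte]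
      simp
    · have hP' : PySem.Str.startswith l ("## " ++ date) = false := Bool.eq_false_iff.mpr hP
      by_cases hH : PySem.Str.startswith l "## " = true
      · rw [pvStepA_boundary _ _ _ _ _ hP' hH]
        obtain ⟨itd', h3⟩ := pvFoldA_sa_true date section_type content rs
          (rl ++ ["### " ++ section_type, content, "", l]) false
        rw [h3, pvFinish_sa]
        simp only [pvPhase2, hP', hH, Bool.not_false, Bool.and_self, reduceIte]
        simp
      · rw [pvStepA_skip _ _ _ _ _ _ _ hP'
            (by simp only [Bool.eq_false_iff.mpr hH, Bool.false_and]), ih (rl ++ [l])]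
        simp only [pvPhase2, hP', Bool.eq_false_iff.mpr hH, Bool.false_and, Bool.false_eq_true,
          reduceIte]
        simp

-- phase 1 (both flags false)
theorem pvFoldA_phase1 (date section_type content : String) :
    ∀ (rest rl : List String),
      pvFinish section_type content (List.foldl (pvStepA date section_type content) (rl, false, false) rest)
      = rl ++ pvPhase1 ("## " ++ date) ["### " ++ section_type, content, ""] rest := by
  intro rest
  induction rest with
  | nil => simp [pvFinish, pvPhase1]
  | cons l rs ih =>
    intro rl
    rw [List.foldl_cons]
    by_cases hP : PySem.Str.startswith l ("## " ++ date) = true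
    · rw [pvStepA_date _ _ _ _ _ _ _ hP, pvFoldA_phase2 date section_type content rs (rl ++ [l])]
      simp only [pvPhase1, hP, reduceIte]
      simp
    · have hP' : PySem.Str.startswith l ("## " ++ date) = false := Bool.eq_false_iff.mpr hP
      rw [pvStepA_skip _ _ _ _ _ _ _ hP' (by simp), ih (rl ++ [l])]
      simp only [pvPhase1, hP', Bool.false_eq_true, reduceIte]
      simp

theorem pvA_eq_phase1 (lines : List String) (date section_type content : String) :
    insert_content_into_existing_date_py lines date section_type content
      = pvPhase1 ("## " ++ date) ["### " ++ section_type, content, ""] lines := by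
  have hdef : insert_content_into_existing_date_py lines date section_type content
      = pvFinish section_type content (List.foldl (pvStepA date section_type content) ([], false, false) lines) := rfl
  rw [hdef, pvFoldA_phase1 date section_type content lines []]
  simp

-- B's inner search equals pvPhase2
theorem pvPhase2_of_none (hdr : String) (blk : List String) :
    ∀ rs : List String,
      rs.findIdx? (fun l => PySem.Str.startswith l "## " && !PySem.Str.startswith l hdr) = none →
      pvPhase2 hdr blk rs = rs ++ blk := by
  intro rs
  induction rs with
  | nil => intro _; simp [pvPhase2]
  | cons l rs ih =>
    intro h
    rw [List.findIdx?_cons] at h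
    by_cases hQ : (PySem.Str.startswith l "## " && !PySem.Str.startswith l hdr) = true
    · rw [hQ] at h; simp at h
    · have hQ' := Bool.eq_false_iff.mpr hQ
      rw [hQ'] at h
      simp only [Bool.false_eq_true, reduceIte, Option.map_eq_none_iff] at h
      simp only [pvPhase2, hQ', Bool.false_eq_true, reduceIte, ih h]
      simp

theorem pvPhase2_of_some (hdr : String) (blk : List String) :
    ∀ (rs : List String) (k : Nat),
      rs.findIdx? (fun l => PySem.Str.startswith l "## " && !PySem.Str.startswith l hdr) = some k →
      pvPhase2 hdr blk rs = rs.take k ++ blk ++ rs.drop k := by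
  intro rs
  induction rs with
  | nil => intro k h; simp at h
  | cons l rs ih =>
    intro k h
    rw [List.findIdx?_cons] at h
    by_cases hQ : (PySem.Str.startswith l "## " && !PySem.Str.startswith l hdr) = true
    · rw [hQ] at h
      simp only [reduceIte, Option.some.injEq] at h
      subst h
      simp only [pvPhase2, hQ, reduceIte]
      simp
    · have hQ' := Bool.eq_false_iff.mpr hQ
      rw [hQ'] at h
      simp only [Bool.false_eq_true, reduceIte] at h
      rcases Option.map_eq_some_iff.mp h with ⟨k', hk', rfl⟩
      simp only [pvPhase2, hQ', Bool.false_eq_true, reduceIte, ih k' hk']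
      simp

theorem pvB_eq_phase1 (lines : List String) (date section_type content : String) :
    insert_content_into_existing_date_py_alt lines date section_type content
      = pvPhase1 ("## " ++ date) ["### " ++ section_type, content, ""] lines := by
  induction lines with
  | nil => rfl
  | cons l rs ih =>
    unfold insert_content_into_existing_date_py_alt
    rw [List.findIdx?_cons]
    by_cases hP : PySem.Str.startswith l ("## " ++ date) = true
    · simp only [hP, reduceIte, List.drop_succ_cons, List.drop_zero]
      cases hQ : rs.findIdx? (fun x => PySem.Str.startswith x "## " && !PySem.Str.startswith x ("## " ++ date)) with
      | none =>
        simp only [pvPhase1, hP, reduceIte, pvPhase2_of_none _ _ rs hQ]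
        simp
      | some k =>
        simp only [pvPhase1, hP, reduceIte, pvPhase2_of_some _ _ rs k hQ, Nat.zero_add]
        simp [show 1 + k = k + 1 from by omega, List.take_succ_cons, List.drop_succ_cons]
    · have hP' := Bool.eq_false_iff.mpr hP
      simp only [hP', Bool.false_eq_true, reduceIte]
      unfold insert_content_into_existing_date_py_alt at ih
      cases hF : rs.findIdx? (fun x => PySem.Str.startswith x ("## " ++ date)) with
      | none =>
        rw [hF] at ih
        simp only [] at ih
        simp only [Option.map_none]
        simp only [pvPhase1, hP', Bool.false_eq_true, reduceIte, ← ih]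
      | some i =>
        rw [hF] at ih
        simp only [] at ih
        simp only [Option.map_some, List.drop_succ_cons]
        cases hQ : (rs.drop (i+1)).findIdx? (fun x => PySem.Str.startswith x "## " && !PySem.Str.startswith x ("## " ++ date)) with
        | none =>
          rw [hQ] at ih
          simp only [] at ih
          simp only [pvPhase1, hP', Bool.false_eq_true, reduceIte, ← ih]
          simp
        | some k =>
          rw [hQ] at ih
          simp only [] at ih
          simp only [pvPhase1, hP', Bool.false_eq_true, reduceIte, ← ih]
          simp only [show i + 1 + 1 + k = (i + 1 + k) + 1 by omega, List.take_succ_cons,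
            List.drop_succ_cons]
          simp

-- ===== VERDICT (by name: the statement is the Claim_ definition above) =====
theorem insert_content_into_existing_date_py_spec : Claim_equal_insert_content_into_existing_date_py := by
  intro lines date section_type content _
  unfold Spec_insert_content_into_existing_date_py
  rw [pvA_eq_phase1, pvB_eq_phase1]
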